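-- pv_equiv track=rewrite | github.com/blackhegde/HandwritingRecognition | src/data/preprocess.py | find_character_boundaries
-- ===== SOURCE A (Python) =====
-- def find_character_boundaries(vertical_projection, threshold):
--     boundaries = []
--     in_character = False
--     start = 0
--
--     for i, total in enumerate(vertical_projection):
--         if not in_character and total > threshold:
--             in_character = True
--             start = i
--         elif in_character and total <= threshold:
--             in_character = False
--             boundaries.append((start, i - 1))
--
--     if in_character:
--         boundaries.append((start, len(vertical_projection) - 1))
--
--     return boundaries
-- ===== SOURCE B (Python) =====
-- def find_character_boundaries(vertical_projection, threshold):
--     # Mask-and-edge-detection: mark entries above threshold, find rising/falling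
--     # edges by comparing with the shifted mask, then pair starts with ends.
--     above = [t > threshold for t in vertical_projection]
--     prev = [False] + above
--     starts = [i for i, (p, a) in enumerate(zip(prev, above)) if a and not p]
--     ends = [i - 1 for i, (p, a) in enumerate(zip(prev, above)) if p and not a]
--     if above and above[-1]:
--         ends.append(len(above) - 1)
--     return list(zip(starts, ends))
-- ===== Notes on version B (the rewrite author's own statement) =====
-- stated objective: alternative
-- what changed: Replaces A's single stateful scan with an in_character flag and run accumulator by a mask-based edge detection: build a boolean above-threshold mask, collect rising-edge indices and falling-edge indices into separate start/end lists by comparing each mask entry with its predecessor, and zip them into (start, end) pairs.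
import Mathlib
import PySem

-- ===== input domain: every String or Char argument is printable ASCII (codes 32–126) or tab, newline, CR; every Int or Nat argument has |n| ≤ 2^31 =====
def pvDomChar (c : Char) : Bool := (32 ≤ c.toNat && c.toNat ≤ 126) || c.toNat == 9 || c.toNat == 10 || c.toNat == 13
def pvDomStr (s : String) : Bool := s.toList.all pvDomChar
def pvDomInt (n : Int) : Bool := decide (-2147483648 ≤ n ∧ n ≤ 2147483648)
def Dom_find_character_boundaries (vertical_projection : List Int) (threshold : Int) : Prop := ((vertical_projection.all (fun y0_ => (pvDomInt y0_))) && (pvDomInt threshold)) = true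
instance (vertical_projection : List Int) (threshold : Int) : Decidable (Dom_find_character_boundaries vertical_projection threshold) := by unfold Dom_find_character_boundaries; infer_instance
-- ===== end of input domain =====

-- B replaces A's stateful run-accumulating scan by a boolean mask whose rising/falling
-- edges are collected into separate start/end lists and zipped (objective: alternative).


-- ===== PORT A =====
def find_character_boundaries (vertical_projection : List Int) (threshold : Int) : List (Int × Int) :=
  let st := (PySem.List.enumerate vertical_projection 0).foldl
    (fun (s : List (Int × Int) × Bool × Int) it =>
      if !s.2.1 && decide (threshold < it.2) then (s.1, true, it.1)
      else if s.2.1 && decide (it.2 ≤ threshold) then (s.1 ++ [(s.2.2, it.1 - 1)], false, s.2.2)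
      else s)
    ([], false, 0)
  if st.2.1 then st.1 ++ [(st.2.2, (vertical_projection.length : Int) - 1)] else st.1

-- ===== PORT B =====
def find_character_boundaries_alt (vertical_projection : List Int) (threshold : Int) : List (Int × Int) :=
  let above := vertical_projection.map (fun t => decide (threshold < t))
  let pairs := PySem.List.enumerate ((false :: above).zip above) 0
  let starts := pairs.filterMap (fun pa => if pa.2.2 && !pa.2.1 then some pa.1 else none)
  let ends0 := pairs.filterMap (fun pa => if pa.2.1 && !pa.2.2 then some (pa.1 - 1) else none)
  let ends := if above.getLastD false then ends0 ++ [(above.length : Int) - 1] else ends0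
  starts.zip ends

-- ===== PRECONDITION & SPEC =====
def Spec_find_character_boundaries (vertical_projection : List Int) (threshold : Int) (out : List (Int × Int)) : Prop := out = find_character_boundaries_alt vertical_projection threshold
instance (vertical_projection : List Int) (threshold : Int) (out : List (Int × Int)) : Decidable (Spec_find_character_boundaries vertical_projection threshold out) := by unfold Spec_find_character_boundaries; infer_instance

-- ===== CLAIM (what is proved, stated in full; the proofs are below) =====
def Claim_equal_find_character_boundaries : Prop := ∀ (vertical_projection : List Int) (threshold : Int), Dom_find_character_boundaries vertical_projection threshold → Spec_find_character_boundaries vertical_projection threshold (find_character_boundaries vertical_projection threshold)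

-- ===== LEMMAS AND PROOFS =====

-- start indices of runs above the threshold, scanning ts from index i with previous flag prev
def pvS (ts : List Int) (th i : Int) (prev : Bool) : List Int :=
  match ts with
  | [] => []
  | t :: ts => (if decide (th < t) && !prev then [i] else []) ++ pvS ts th (i + 1) (decide (th < t))

-- end indices without the final flush
def pvE0 (ts : List Int) (th i : Int) (prev : Bool) : List Int :=
  match ts with
  | [] => []
  | t :: ts => (if prev && !(decide (th < t)) then [i - 1] else []) ++ pvE0 ts th (i + 1) (decide (th < t))

-- end indices including the final flush
def pvE (ts : List Int) (th i : Int) (prev : Bool) : List Int :=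
  match ts with
  | [] => if prev then [i - 1] else []
  | t :: ts => (if prev && !(decide (th < t)) then [i - 1] else []) ++ pvE ts th (i + 1) (decide (th < t))

theorem pvA_loop (ts : List Int) (th : Int) : ∀ (i start : Int) (inc : Bool) (acc : List (Int × Int)),
    (let st := (PySem.List.enumerate ts i).foldl
      (fun (s : List (Int × Int) × Bool × Int) it =>
        if !s.2.1 && decide (th < it.2) then (s.1, true, it.1)
        else if s.2.1 && decide (it.2 ≤ th) then (s.1 ++ [(s.2.2, it.1 - 1)], false, s.2.2)
        else s)
      (acc, inc, start)
     if st.2.1 then st.1 ++ [(st.2.2, i + (ts.length : Int) - 1)] else st.1)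
    = acc ++ List.zip ((if inc then [start] else []) ++ pvS ts th i inc) (pvE ts th i inc) := by
  induction ts with
  | nil =>
    intro i start inc acc
    cases inc <;> simp [PySem.List.enumerate_nil, pvS, pvE]
  | cons t ts ih =>
    intro i start inc acc
    rw [PySem.List.enumerate_cons, List.foldl_cons]
    simp only [List.length_cons]
    push_cast
    rw [show i + ((ts.length : Int) + 1) - 1 = (i + 1) + (ts.length : Int) - 1 by ring]
    by_cases hb : th < t
    · have hle : ¬ (t ≤ th) := by omega
      cases inc with
      | false =>
        simp only [pvS, pvE, hb, hle, decide_true, decide_false, Bool.not_false, Bool.and_true,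
          Bool.false_and, Bool.and_false, if_true, if_false]
        simpa [List.append_assoc] using ih (i + 1) i true acc
      | true =>
        simp only [pvS, pvE, hb, hle, decide_true, decide_false, Bool.not_true, Bool.and_false,
          Bool.false_and, if_false, Bool.true_and, Bool.not_false]
        simpa [List.append_assoc] using ih (i + 1) start true acc
    · have hle : t ≤ th := by omega
      cases inc with
      | false =>
        simp only [pvS, pvE, hb, hle, decide_false, decide_true, Bool.false_and, Bool.and_false,
          if_false, Bool.not_false, Bool.and_true]
        simpa [List.append_assoc] using ih (i + 1) start false acc
      | true =>
        simp only [pvS, pvE, hb, hle, decide_false, decide_true, Bool.not_true, Bool.and_false,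
          Bool.false_and, if_false, Bool.true_and, Bool.not_false, Bool.and_true, if_true]
        have := ih (i + 1) start false (acc ++ [(start, i - 1)])
        simp only [if_neg (by simp : ¬ false = true)] at this ⊢
        rw [this]
        simp [List.zip_cons_cons, List.append_assoc]

-- B's start filterMap computes pvS
theorem pvB_starts (ts : List Int) (th : Int) : ∀ (i : Int) (prev : Bool),
    ((PySem.List.enumerate ((prev :: ts.map (fun t => decide (th < t))).zip (ts.map (fun t => decide (th < t)))) i).filterMap
      (fun pa => if pa.2.2 && !pa.2.1 then some pa.1 else none))
    = pvS ts th i prev := by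
  induction ts with
  | nil => intro i prev; simp [PySem.List.enumerate_nil, pvS]
  | cons t ts ih =>
    intro i prev
    rw [List.map_cons, List.zip_cons_cons, PySem.List.enumerate_cons, List.filterMap_cons]
    by_cases hb : th < t
    · have hd : decide (th < t) = true := by simp [hb]
      cases prev <;>
        simp only [pvS, hd, Bool.not_true, Bool.not_false, Bool.and_true, Bool.and_false,
          Bool.true_and, Bool.false_and, Bool.false_eq_true, reduceIte, ih,
          List.singleton_append, List.nil_append]
    · have hd : decide (th < t) = false := by simp [hb]
      cases prev <;>
        simp only [pvS, hd, Bool.not_true, Bool.not_false, Bool.and_true, Bool.and_false,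
          Bool.true_and, Bool.false_and, Bool.false_eq_true, reduceIte, ih,
          List.singleton_append, List.nil_append]

-- B's end filterMap computes pvE0
theorem pvB_ends (ts : List Int) (th : Int) : ∀ (i : Int) (prev : Bool),
    ((PySem.List.enumerate ((prev :: ts.map (fun t => decide (th < t))).zip (ts.map (fun t => decide (th < t)))) i).filterMap
      (fun pa => if pa.2.1 && !pa.2.2 then some (pa.1 - 1) else none))
    = pvE0 ts th i prev := by
  induction ts with
  | nil => intro i prev; simp [PySem.List.enumerate_nil, pvE0]
  | cons t ts ih =>
    intro i prev
    rw [List.map_cons, List.zip_cons_cons, PySem.List.enumerate_cons, List.filterMap_cons]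
    by_cases hb : th < t
    · have hd : decide (th < t) = true := by simp [hb]
      cases prev <;>
        simp only [pvE0, hd, Bool.not_true, Bool.not_false, Bool.and_true, Bool.and_false,
          Bool.true_and, Bool.false_and, Bool.false_eq_true, reduceIte, ih,
          List.singleton_append, List.nil_append]
    · have hd : decide (th < t) = false := by simp [hb]
      cases prev <;>
        simp only [pvE0, hd, Bool.not_true, Bool.not_false, Bool.and_true, Bool.and_false,
          Bool.true_and, Bool.false_and, Bool.false_eq_true, reduceIte, ih,
          List.singleton_append, List.nil_append]

-- pvE is pvE0 plus the flush at the last index when the mask ends high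
theorem pvE_split (ts : List Int) (th : Int) : ∀ (i : Int) (prev : Bool),
    pvE ts th i prev = pvE0 ts th i prev ++
      (if (ts.map (fun t => decide (th < t))).getLastD prev then [i + (ts.length : Int) - 1] else []) := by
  induction ts with
  | nil => intro i prev; cases prev <;> simp [pvE, pvE0]
  | cons t ts ih =>
    intro i prev
    simp only [pvE, pvE0, List.map_cons, List.getLastD_cons, List.length_cons, ih (i + 1)]
    push_cast
    rw [show i + ((ts.length : Int) + 1) - 1 = i + 1 + (ts.length : Int) - 1 by ring]
    simp [List.append_assoc]

-- ===== VERDICT (by name: the statement is the Claim_ definition above) =====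
theorem find_character_boundaries_spec : Claim_equal_find_character_boundaries := by
  intro vp th _
  unfold Spec_find_character_boundaries find_character_boundaries find_character_boundaries_alt
  have hA := pvA_loop vp th 0 0 false []
  rw [show (0 : Int) + (vp.length : Int) - 1 = (vp.length : Int) - 1 by ring] at hA
  simp only [Bool.false_eq_true, if_false, List.nil_append] at hA
  simp only [hA, pvB_starts, pvB_ends, pvE_split, List.length_map]
  rw [show (0 : Int) + (vp.length : Int) - 1 = (vp.length : Int) - 1 by ring]
  by_cases hl : (vp.getLast?.map (fun t => decide (th < t))).getD false = true <;> simp [hl]
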